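-- pv_equiv track=rewrite | github.com/willyhub31/business-english-podcast-automation | build_business_english_episode.py | split_scene_audio_blocks
-- ===== SOURCE A (Python) =====
-- from typing import Dict, List, Tuple
--
-- def split_scene_audio_blocks(lines: List[str]) -> List[List[str]]:
--     blocks: List[List[str]] = []
--     current_block: List[str] = []
--     current_kind: str | None = None
--
--     for line in lines:
--         speaker = line.split(":", 1)[0].strip()
--         kind = "hosts" if speaker in {"Sophie", "Leo"} else "guests"
--         if current_block and kind != current_kind:
--             blocks.append(current_block)
--             current_block = []
--         current_block.append(line)
--         current_kind = kind
--
--     if current_block: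
--         blocks.append(current_block)
--
--     return blocks
-- ===== SOURCE B (Python) =====
-- from typing import List
--
--
-- def split_scene_audio_blocks(lines: List[str]) -> List[List[str]]:
--     def kind(line: str) -> str:
--         speaker = line.split(":", 1)[0].strip()
--         return "hosts" if speaker in {"Sophie", "Leo"} else "guests"
--
--     # Build the answer back-to-front: walk the lines right-to-left and either extend
--     # the most recently opened block or open a new one. Blocks and their contents are
--     # accumulated in reverse (appends only) and un-reversed at the end.
--     rev_blocks: List[List[str]] = []
--     for line in reversed(lines):
--         if rev_blocks and kind(rev_blocks[-1][-1]) == kind(line):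
--             rev_blocks[-1].append(line)
--         else:
--             rev_blocks.append([line])
--     return [b[::-1] for b in reversed(rev_blocks)]
-- ===== Notes on version B (the rewrite author's own statement) =====
-- stated objective: alternative
-- what changed: Traverses the lines right-to-left and builds the output back-to-front: each line either extends the most recently opened block (when its kind matches a line already in that block) or opens a new block, so A's current_block/current_kind state machine and its final flush disappear; the reverse-built accumulators are un-reversed at the end.
import Mathlib
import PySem

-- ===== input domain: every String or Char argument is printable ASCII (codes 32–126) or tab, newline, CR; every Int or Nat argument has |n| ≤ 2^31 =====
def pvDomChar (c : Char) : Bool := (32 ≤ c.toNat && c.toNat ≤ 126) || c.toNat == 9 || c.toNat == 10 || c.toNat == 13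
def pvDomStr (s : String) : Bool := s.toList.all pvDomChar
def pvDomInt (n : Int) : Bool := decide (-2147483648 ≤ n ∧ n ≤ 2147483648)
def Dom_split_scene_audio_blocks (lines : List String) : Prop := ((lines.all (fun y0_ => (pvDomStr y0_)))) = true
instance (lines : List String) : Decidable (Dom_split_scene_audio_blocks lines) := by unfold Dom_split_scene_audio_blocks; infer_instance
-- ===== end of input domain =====

-- ===== PORT A =====
-- B builds the output back-to-front by a right-to-left traversal over reverse-built accumulators (alternative decomposition; same cost).
-- kind of one line: line.split(":", 1)[0].strip(), then "hosts" if in {"Sophie","Leo"} else "guests".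
-- (split with a nonempty separator always yields a nonempty list, so the headD default is never used)
def pvKind (line : String) : String :=
  let speaker := PySem.Str.strip (((PySem.Str.splitMax? line ":" 1).getD [line]).headD line)
  if speaker == "Sophie" || speaker == "Leo" then "hosts" else "guests"

-- one iteration of A's loop over state (blocks, current_block, current_kind)
def pvStepA (s : List (List String) × List String × Option String) (line : String) :
    List (List String) × List String × Option String :=
  let kind := pvKind line
  let p := if s.2.1 ≠ [] ∧ some kind ≠ s.2.2 then (s.1 ++ [s.2.1], ([] : List String))
           else (s.1, s.2.1)
  (p.1, p.2 ++ [line], some kind)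

def split_scene_audio_blocks (lines : List String) : List (List String) :=
  let st := lines.foldl pvStepA ([], [], none)
  if st.2.1 ≠ [] then st.1 ++ [st.2.1] else st.1

-- ===== PORT B =====
-- one iteration of B's reversed loop. Source B keeps rev_blocks and each block in reverse of the
-- output order (append-only); here that reversed representation is a cons list, so Python's
-- rev_blocks[-1] is the head block, its [-1] is that block's head (never empty, so headD is
-- never used), appending is cons, and Source B's final double reversal is the identity of this
-- representation. List.foldr processes the lines right-to-left exactly as Source B's reversed().
def pvStepB (line : String) (blocks : List (List String)) : List (List String) :=
  match blocks with
  | b :: rest => if pvKind (b.headD "") == pvKind line then (line :: b) :: rest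
                 else [line] :: b :: rest
  | [] => [[line]]

def split_scene_audio_blocks_alt (lines : List String) : List (List String) :=
  lines.foldr pvStepB []

-- ===== PRECONDITION & SPEC =====
def Spec_split_scene_audio_blocks (lines : List String) (out : List (List String)) : Prop := out = split_scene_audio_blocks_alt lines
instance (lines : List String) (out : List (List String)) : Decidable (Spec_split_scene_audio_blocks lines out) := by unfold Spec_split_scene_audio_blocks; infer_instance

-- ===== CLAIM (what is proved, stated in full; the proofs are below) =====
def Claim_equal_split_scene_audio_blocks : Prop := ∀ (lines : List String), Dom_split_scene_audio_blocks lines → Spec_split_scene_audio_blocks lines (split_scene_audio_blocks lines)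

-- ===== LEMMAS AND PROOFS =====
-- proof-side canonical run builder: extend the current run while the key matches, else emit it
def pvGo (k : String) (run : List String) : List String → List (List String)
  | [] => [run]
  | y :: ys =>
      let ky := pvKind y
      if ky == k then pvGo k (run ++ [y]) ys else run :: pvGo ky [y] ys

lemma pvGo_ne_nil (ls : List String) : ∀ (k : String) (run : List String), pvGo k run ls ≠ [] := by
  induction ls with
  | nil => intro k run; simp [pvGo]
  | cons y ys ih =>
      intro k run
      by_cases h : pvKind y = k
      · simpa [pvGo, h] using ih k (run ++ [y])
      · simp [pvGo, h]

lemma pvGo_modifyHead (ls : List String) : ∀ (k : String) (pre run : List String),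
    pvGo k (pre ++ run) ls = (pvGo k run ls).modifyHead (pre ++ ·) := by
  induction ls with
  | nil => intro k pre run; simp [pvGo]
  | cons y ys ih =>
      intro k pre run
      by_cases h : pvKind y = k
      · simpa [pvGo, h, List.append_assoc] using ih k pre (run ++ [y])
      · simp [pvGo, h]

-- loop invariant: A's fold started from a nonempty current block of kind k finalizes to blocks ++ the runs pvGo builds
lemma pv_inv (ls : List String) : ∀ (blocks : List (List String)) (cur : List String) (k : String), cur ≠ [] →
    (let st := ls.foldl pvStepA (blocks, cur, some k);
     if st.2.1 ≠ [] then st.1 ++ [st.2.1] else st.1) = blocks ++ pvGo k cur ls := by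
  induction ls with
  | nil => intro blocks cur k hc; simp [pvGo, hc]
  | cons y ys ih =>
      intro blocks cur k hc
      simp only [List.foldl_cons, pvGo]
      by_cases hk : pvKind y = k
      · have h1 : pvStepA (blocks, cur, some k) y = (blocks, cur ++ [y], some (pvKind y)) := by
          simp [pvStepA, hk]
        rw [h1, hk]
        simpa [hk] using ih blocks (cur ++ [y]) k (by simp)
      · have h1 : pvStepA (blocks, cur, some k) y = (blocks ++ [cur], [y], some (pvKind y)) := by
          simp [pvStepA, hc, hk]
        rw [h1]
        simpa [hk, List.append_assoc] using ih (blocks ++ [cur]) [y] (pvKind y) (by simp)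

-- A equals the canonical run builder
lemma pvA_eq_go (lines : List String) :
    split_scene_audio_blocks lines =
      (match lines with | [] => [] | x :: xs => pvGo (pvKind x) [x] xs) := by
  cases lines with
  | nil => rfl
  | cons x xs =>
      show (let st := (x :: xs).foldl pvStepA ([], [], none);
            if st.2.1 ≠ [] then st.1 ++ [st.2.1] else st.1) = _
      simp only [List.foldl_cons]
      have h0 : pvStepA ([], [], none) x = ([], [x], some (pvKind x)) := by
        simp [pvStepA]
      rw [h0]
      simpa using pv_inv xs [] [x] (pvKind x) (by simp)

-- B's right-to-left step over the canonical chunks rebuilds the canonical chunks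
lemma pvB_eq_go (lines : List String) :
    split_scene_audio_blocks_alt lines =
      (match lines with | [] => [] | x :: xs => pvGo (pvKind x) [x] xs) := by
  induction lines with
  | nil => rfl
  | cons x xs ih =>
      have hx : split_scene_audio_blocks_alt (x :: xs) = pvStepB x (split_scene_audio_blocks_alt xs) := rfl
      rw [hx, ih]
      cases xs with
      | nil => rfl
      | cons y ys =>
          -- shape of the canonical chunks of y :: ys : first block starts with y
          obtain ⟨b, rest, hb⟩ : ∃ b rest, pvGo (pvKind y) [] ys = b :: rest := by
            cases h : pvGo (pvKind y) [] ys with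
            | nil => exact absurd h (pvGo_ne_nil ys (pvKind y) [])
            | cons b rest => exact ⟨b, rest, rfl⟩
          have hshape : pvGo (pvKind y) [y] ys = (y :: b) :: rest := by
            have := pvGo_modifyHead ys (pvKind y) [y] []
            simpa [hb] using this
          show pvStepB x (pvGo (pvKind y) [y] ys) = pvGo (pvKind x) [x] (y :: ys)
          rw [hshape]
          by_cases hk : pvKind y = pvKind x
          · have h2 : pvGo (pvKind x) [x, y] ys = (x :: y :: b) :: rest := by
              have := pvGo_modifyHead ys (pvKind x) [x, y] []
              simpa [hk ▸ hb] using this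
            simp [pvStepB, pvGo, hk, h2]
          · simp [pvStepB, pvGo, hk, hshape]

-- ===== VERDICT (by name: the statement is the Claim_ definition above) =====
theorem split_scene_audio_blocks_spec : Claim_equal_split_scene_audio_blocks := by
  intro lines _
  unfold Spec_split_scene_audio_blocks
  rw [pvA_eq_go, pvB_eq_go]
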